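-- pv_equiv track=rewrite | github.com/bensonjing/Columns_Game | code/columns.py | _fill
-- ===== SOURCE A (Python) =====
-- def _fill(board: list[list]) -> list[list]:
--     for i in range(len(board)):
--         for j in range(len(board[i])-1, -1, -1):
--             if board[i][j] == '   ':
--                 for a in range(j-1, -1, -1):
--                     if board[i][a] != '   ':
--                         board[i][j], board[i][a] = board[i][a], '   '
--                         break
--     return board
-- ===== SOURCE B (Python) =====
-- def _fill(board: list[list]) -> list[list]:
--     # One pass per row: keep non-empty cells, right-align them (mutates rows in place like A).
--     for row in board:
--         keep = [c for c in row if c != '   ']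
--         row[:] = ['   '] * (len(row) - len(keep)) + keep
--     return board
-- ===== Notes on version B (the rewrite author's own statement) =====
-- stated objective: simpler
-- what changed: Replaces the per-empty-cell backward scan-and-swap per row with a single filter-and-pad pass that rebuilds each row right-aligned.
import Mathlib
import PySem

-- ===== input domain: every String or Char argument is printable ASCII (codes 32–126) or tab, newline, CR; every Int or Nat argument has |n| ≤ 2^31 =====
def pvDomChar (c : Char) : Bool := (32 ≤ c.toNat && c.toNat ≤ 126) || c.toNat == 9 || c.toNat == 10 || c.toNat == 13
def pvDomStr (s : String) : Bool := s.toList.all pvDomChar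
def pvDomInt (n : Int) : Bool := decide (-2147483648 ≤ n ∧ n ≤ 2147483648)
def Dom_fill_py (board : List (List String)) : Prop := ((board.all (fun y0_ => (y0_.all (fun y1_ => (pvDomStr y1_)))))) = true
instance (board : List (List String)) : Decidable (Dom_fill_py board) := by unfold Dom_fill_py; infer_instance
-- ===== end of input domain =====

-- B replaces A's per-empty-cell backward scan-and-swap with one filter-and-pad pass per row.
-- Both Pythons mutate `board`'s rows in place; the equivalence proved here is about the return value.

-- ===== PORT A =====
-- `for a in range(j-1, -1, -1): if board[i][a] != '   ': swap; break`
-- fuel `a` means the loop is currently at index `a-1`; `a = 0` means the range is exhausted.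
def fillPyA (r : List String) (j : Nat) : Nat → List String
  | 0 => r
  | a + 1 =>
    if r.getD a "" ≠ "   " then (r.set j (r.getD a "")).set a "   "
    else fillPyA r j a

-- `for j in range(len(board[i])-1, -1, -1): if board[i][j] == '   ': <inner loop>`
-- fuel `j` means the loop is currently at index `j-1`.
def fillPyJ (r : List String) : Nat → List String
  | 0 => r
  | j + 1 => fillPyJ (if r.getD j "" = "   " then fillPyA r j j else r) j

-- `for i in range(len(board)):` — only row i is read and written at step i.
def fillPyI (b : List (List String)) (i : Nat) : List (List String) :=
  if h : i < b.length then
    fillPyI (b.set i (fillPyJ (b.getD i []) (b.getD i []).length)) (i + 1)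
  else b
termination_by b.length - i
decreasing_by simp_all; omega

def fill_py (board : List (List String)) : List (List String) := fillPyI board 0

-- ===== PORT B =====
-- keep = [c for c in row if c != '   ']; row = ['   '] * (len(row) - len(keep)) + keep
def fillRowB (row : List String) : List String :=
  let keep := row.filter (fun c => c ≠ "   ")
  List.replicate (row.length - keep.length) "   " ++ keep

def fill_py_alt (board : List (List String)) : List (List String) := board.map fillRowB

-- ===== PRECONDITION & SPEC =====
def Spec_fill_py (board : List (List String)) (out : List (List String)) : Prop := out = fill_py_alt board
instance (board : List (List String)) (out : List (List String)) : Decidable (Spec_fill_py board out) := by unfold Spec_fill_py; infer_instance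

-- ===== CLAIM (what is proved, stated in full; the proofs are below) =====
def Claim_equal_fill_py : Prop := ∀ (board : List (List String)), Dom_fill_py board → Spec_fill_py board (fill_py board)

-- ===== LEMMAS AND PROOFS =====

-- A's inner loop equals: find the last non-empty index below `a` and swap it into `j`.
def findNE (r : List String) : Nat → Option Nat
  | 0 => none
  | a + 1 => if r.getD a "" ≠ "   " then some a else findNE r a

theorem fillPyA_eq_findNE (r : List String) (j a : Nat) :
    fillPyA r j a = match findNE r a with
      | none => r
      | some m => (r.set j (r.getD m "")).set m "   " := by
  induction a with
  | zero => simp [fillPyA, findNE]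
  | succ a ih =>
    simp only [fillPyA, findNE]
    split <;> simp [ih]

theorem findNE_none (r : List String) (a : Nat) (h : findNE r a = none) :
    ∀ i < a, r.getD i "" = "   " := by
  induction a with
  | zero => omega
  | succ a ih =>
    intro i hi
    simp only [findNE] at h
    split at h
    · exact absurd h (by simp)
    · rcases Nat.lt_succ_iff_lt_or_eq.mp hi with h' | h'
      · exact ih h i h'
      · subst h'; by_contra hne; simp_all

theorem findNE_some (r : List String) (a m : Nat) (h : findNE r a = some m) :
    m < a ∧ r.getD m "" ≠ "   " ∧ ∀ i, m < i → i < a → r.getD i "" = "   " := by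
  induction a with
  | zero => simp [findNE] at h
  | succ a ih =>
    simp only [findNE] at h
    split at h
    · rename_i hne
      obtain rfl : m = a := by simpa using h.symm
      exact ⟨Nat.lt_succ_self _, hne, fun i h1 h2 => by omega⟩
    · obtain ⟨h1, h2, h3⟩ := ih h
      refine ⟨by omega, h2, fun i hi1 hi2 => ?_⟩
      rcases Nat.lt_succ_iff_lt_or_eq.mp hi2 with h' | h'
      · exact h3 i hi1 h'
      · subst h'; simp_all

theorem take_decomp (r : List String) (m j : Nat) (hm : m < j) (hj : j ≤ r.length) (hmr : m < r.length) :
    r.take j = r.take m ++ r[m]'hmr :: ((r.drop (m+1)).take (j - (m+1))) := by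
  have h1 : j = m + (1 + (j - (m+1))) := by omega
  conv_lhs => rw [h1, List.take_add]
  rw [List.drop_eq_getElem_cons hmr, Nat.add_comm 1, List.take_succ_cons]

theorem mid_filter_nil (r : List String) (m j : Nat) (hj : j ≤ r.length)
    (h : ∀ i, m < i → i < j → r.getD i "" = "   ") :
    ((r.drop (m+1)).take (j - (m+1))).filter (fun c => c ≠ "   ") = [] := by
  rw [List.filter_eq_nil_iff]
  intro a ha
  obtain ⟨i, hi, rfl⟩ := List.mem_iff_getElem.mp ha
  have hlen : i < j - (m+1) := by
    have := hi; simp [List.length_take, List.length_drop] at this; omega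
  have hir : m + 1 + i < r.length := by
    have := hi; simp [List.length_take, List.length_drop] at this; omega
  have hg : ((r.drop (m+1)).take (j - (m+1)))[i] = r[m+1+i]'hir := by
    simp [List.getElem_take, List.getElem_drop]
  rw [hg]
  have := h (m+1+i) (by omega) (by omega)
  rw [List.getD_eq_getElem r "" hir] at this
  simp [this]

theorem filter_take_nil (r : List String) (j : Nat) (hj : j ≤ r.length)
    (h : ∀ i, i < j → r.getD i "" = "   ") :
    (r.take j).filter (fun c => c ≠ "   ") = [] := by
  rw [List.filter_eq_nil_iff]
  intro a ha
  obtain ⟨i, hi, rfl⟩ := List.mem_iff_getElem.mp ha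
  have hlen : i < j := by have := hi; simp [List.length_take] at this; omega
  have hir : i < r.length := by omega
  have hg : (r.take j)[i] = r[i]'hir := by simp [List.getElem_take]
  rw [hg]
  have := h i hlen
  rw [List.getD_eq_getElem r "" hir] at this
  simp [this]

theorem fillPyJ_spec (j : Nat) : ∀ (r : List String), j ≤ r.length →
    fillPyJ r j =
      (List.replicate (j - ((r.take j).filter (fun c => c ≠ "   ")).length) "   "
        ++ (r.take j).filter (fun c => c ≠ "   ")) ++ r.drop j := by
  induction j with
  | zero => intro r _; simp [fillPyJ]
  | succ j ih =>
    intro r hj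
    have hjr : j < r.length := hj
    have hget : r.getD j "" = r[j]'hjr := List.getD_eq_getElem r "" hjr
    have htake : r.take (j+1) = r.take j ++ [r[j]'hjr] := by
      rw [List.take_succ]; simp [List.getElem?_eq_getElem hjr]
    have hdrop : r.drop j = r[j]'hjr :: r.drop (j+1) := List.drop_eq_getElem_cons hjr
    simp only [fillPyJ]
    by_cases hE : r.getD j "" = "   "
    · -- board[i][j] == '   '
      have hxE : r[j]'hjr = "   " := by rw [← hget]; exact hE
      rw [if_pos hE, fillPyA_eq_findNE]
      have hfilsucc : (r.take (j+1)).filter (fun c => c ≠ "   ")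
          = (r.take j).filter (fun c => c ≠ "   ") := by
        simp [htake, hxE]
      cases hfind : findNE r j with
      | none =>
        have hall := findNE_none r j hfind
        have hnil := filter_take_nil r j (le_of_lt hjr) hall
        have hnil' : (r.take (j+1)).filter (fun c => c ≠ "   ") = [] := by
          rw [hfilsucc, hnil]
        rw [ih r (le_of_lt hjr), hnil, hnil']
        simp [hdrop, hxE, List.replicate_succ']
      | some m =>
        obtain ⟨hm, hne, hmid⟩ := findNE_some r j m hfind
        have hmr : m < r.length := by omega
        have hgm : r.getD m "" = r[m]'hmr := List.getD_eq_getElem r "" hmr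
        have hnem : ¬(r[m]'hmr = "   ") := by rw [← hgm]; exact hne
        have hdec := take_decomp r m j hm (le_of_lt hjr) hmr
        have hmidnil := mid_filter_nil r m j (le_of_lt hjr) hmid
        simp only [ne_eq, decide_not] at hmidnil
        have hfilj : (r.take j).filter (fun c => c ≠ "   ")
            = (r.take m).filter (fun c => c ≠ "   ") ++ [r[m]'hmr] := by
          rw [hdec, List.filter_append]
          simp [hmidnil, hnem]
        have hlentm : (r.take m).length = m := by simp; omega
        have htakerr : ((r.set j (r.getD m "")).set m "   ").take j
            = r.take m ++ "   " :: ((r.drop (m+1)).take (j - (m+1))) := by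
          rw [List.take_set, List.take_set]
          have hnoop : (r.take j).set j (r.getD m "") = r.take j := by
            apply List.set_eq_of_length_le; simp
          rw [hnoop, hdec, List.set_append]
          simp [hlentm]
        have hfilrr : (((r.set j (r.getD m "")).set m "   ").take j).filter (fun c => c ≠ "   ")
            = (r.take m).filter (fun c => c ≠ "   ") := by
          rw [htakerr, List.filter_append]
          simp [hmidnil]
        have hdroprr : ((r.set j (r.getD m "")).set m "   ").drop j
            = r[m]'hmr :: r.drop (j+1) := by
          rw [List.drop_set, List.drop_set]
          rw [if_pos hm, if_neg (by omega)]
          simp only [Nat.sub_self]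
          rw [hdrop, hgm, List.set_cons_zero]
        have hjrr : j ≤ ((r.set j (r.getD m "")).set m "   ").length := by simp; omega
        rw [ih _ hjrr, hfilrr, hdroprr, hfilsucc, hfilj]
        have harith : j + 1 - (((r.take m).filter (fun c => c ≠ "   ")).length + 1)
            = j - ((r.take m).filter (fun c => c ≠ "   ")).length := by omega
        simp only [List.length_append, List.length_cons, List.length_nil, Nat.zero_add, harith]
        simp
    · -- board[i][j] != '   '
      rw [if_neg hE]
      have hxE : ¬ (r[j]'hjr = "   ") := by rw [← hget]; exact hE
      have hfilsucc : (r.take (j+1)).filter (fun c => c ≠ "   ")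
          = (r.take j).filter (fun c => c ≠ "   ") ++ [r[j]'hjr] := by
        rw [htake, List.filter_append]
        simp [hxE]
      rw [ih r (le_of_lt hjr), hfilsucc, hdrop]
      have harith : j + 1 - (((r.take j).filter (fun c => c ≠ "   ")).length + 1)
          = j - ((r.take j).filter (fun c => c ≠ "   ")).length := by omega
      simp [harith]

theorem fillPyJ_row (row : List String) : fillPyJ row row.length = fillRowB row := by
  rw [fillPyJ_spec row.length row le_rfl]
  simp [fillRowB]

theorem fillPyI_spec (b : List (List String)) (i : Nat) :
    fillPyI b i = b.take i ++ (b.drop i).map fillRowB := by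
  rw [fillPyI]
  split
  · rename_i h
    have hrow : b.getD i [] = b[i]'h := List.getD_eq_getElem b [] h
    have ih := fillPyI_spec (b.set i (fillPyJ (b.getD i []) (b.getD i []).length)) (i+1)
    rw [ih, hrow, fillPyJ_row]
    have htake : (b.set i (fillRowB (b[i]'h))).take (i+1)
        = b.take i ++ [fillRowB (b[i]'h)] := by
      rw [List.take_set, List.take_succ, List.getElem?_eq_getElem h, List.set_append]
      simp [Nat.min_eq_left (le_of_lt h)]
    have hdropset : (b.set i (fillRowB (b[i]'h))).drop (i+1) = b.drop (i+1) := by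
      rw [List.drop_set, if_pos (by omega)]
    rw [htake, hdropset]
    conv_rhs => rw [List.drop_eq_getElem_cons h]
    simp
    have hlen2 : i < (b.map fillRowB).length := by simpa using h
    rw [List.drop_eq_getElem_cons hlen2, List.getElem_map]
  · rename_i h
    have hlen : b.length ≤ i := by omega
    simp [List.take_of_length_le (by omega), List.drop_eq_nil_of_le (by omega)]
termination_by b.length - i
decreasing_by simp_all; omega

-- ===== VERDICT (by name: the statement is the Claim_ definition above) =====
theorem fill_py_spec : Claim_equal_fill_py := by
  intro board _
  show fill_py board = fill_py_alt board
  simp [fill_py, fill_py_alt, fillPyI_spec]
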